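-- pv_equiv track=rewrite | github.com/iansealy/bio-misc-py | removesuperfluouscols.py | _get_dupe_cols
-- ===== SOURCE A (Python) =====
-- def _get_dupe_cols(data: list[list[str]], drop_cols: set[int]) -> set[int]:
--     """Look for duplicate columns."""
--     for i, col1 in enumerate(data):
--         for j, col2 in enumerate(data):
--             if j <= i:
--                 continue
--             if col1 == col2:
--                 drop_cols.add(j)
--     return drop_cols
-- ===== SOURCE B (Python) =====
-- def _get_dupe_cols(data: list[list[str]], drop_cols: set[int]) -> set[int]:
--     """Look for duplicate columns."""
--     groups: dict[tuple, list[int]] = {}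
--     for i, col in enumerate(data):
--         groups.setdefault(tuple(col), []).append(i)
--     for idxs in groups.values():
--         for j in idxs[1:]:
--             drop_cols.add(j)
--     return drop_cols
-- ===== Notes on version B (the rewrite author's own statement) =====
-- stated objective: alternative
-- what changed: Replaces the nested pairwise column comparison with one dict-grouping pass (column -> list of its indices) followed by marking every non-first index of each group.
import Mathlib
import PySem

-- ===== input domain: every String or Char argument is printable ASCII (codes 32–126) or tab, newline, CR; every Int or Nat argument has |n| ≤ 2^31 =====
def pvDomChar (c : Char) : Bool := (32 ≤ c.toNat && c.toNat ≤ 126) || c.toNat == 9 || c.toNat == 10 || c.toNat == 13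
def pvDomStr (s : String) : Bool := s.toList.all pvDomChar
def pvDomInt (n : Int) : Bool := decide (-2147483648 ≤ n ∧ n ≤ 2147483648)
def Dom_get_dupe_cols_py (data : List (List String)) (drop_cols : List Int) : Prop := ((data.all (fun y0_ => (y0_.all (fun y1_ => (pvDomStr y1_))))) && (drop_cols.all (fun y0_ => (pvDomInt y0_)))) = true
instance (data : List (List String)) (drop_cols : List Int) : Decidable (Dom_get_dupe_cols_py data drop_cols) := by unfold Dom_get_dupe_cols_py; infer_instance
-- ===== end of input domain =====

-- B replaces A's nested pairwise column scan by one dict-grouping pass (column -> index list)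
-- followed by marking every non-first index of each group; the equivalence is about the returned
-- value (in Python both mutate drop_cols in place through the same set.add calls).

-- ===== PORT A =====
def get_dupe_cols_py (data : List (List String)) (drop_cols : List Int) : List Int :=
  (PySem.List.enumerate data).foldl (fun dc p =>
    (PySem.List.enumerate data).foldl (fun dc2 q =>
      if q.1 ≤ p.1 then dc2
      else if p.2 = q.2 then PySem.Set.add dc2 q.1 else dc2) dc) drop_cols

-- ===== PORT B =====
-- the dict `groups` of B: column -> list of its indices, in first-occurrence order
def pvGroups (data : List (List String)) : PySem.Dict (List String) (List Int) :=
  (PySem.List.enumerate data).foldl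
    (fun d p => d.modify p.2 [] (fun v => v ++ [p.1])) PySem.Dict.empty

def get_dupe_cols_py_alt (data : List (List String)) (drop_cols : List Int) : List Int :=
  (pvGroups data).values.foldl (fun dc idxs =>
    (PySem.List.slice idxs (some 1) none).foldl (fun dc2 j => PySem.Set.add dc2 j) dc) drop_cols

-- ===== PRECONDITION & SPEC =====
def Spec_get_dupe_cols_py (data : List (List String)) (drop_cols : List Int) (out : List Int) : Prop := out = get_dupe_cols_py_alt data drop_cols
instance (data : List (List String)) (drop_cols : List Int) (out : List Int) : Decidable (Spec_get_dupe_cols_py data drop_cols out) := by unfold Spec_get_dupe_cols_py; infer_instance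

-- ===== CLAIM (what is proved, stated in full; the proofs are below) =====
def Claim_equal_get_dupe_cols_py : Prop := ∀ (data : List (List String)) (drop_cols : List Int), Dom_get_dupe_cols_py data drop_cols → Spec_get_dupe_cols_py data drop_cols (get_dupe_cols_py data drop_cols)

-- ===== LEMMAS AND PROOFS =====

-- indices (in increasing order) of the columns of `data` equal to `c`
def pvIdxs (data : List (List String)) (c : List String) : List Int :=
  ((PySem.List.enumerate data).filter (fun p => p.2 == c)).map (·.1)

-- indices of columns equal to `c` that lie strictly after position `i`
def pvLater (data : List (List String)) (i : Int) (c : List String) : List Int :=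
  ((PySem.List.enumerate data).filter
    (fun q => decide (i < q.1) && (q.2 == c))).map (·.1)

def pvStep (data : List (List String)) (dc : List Int) (p : Int × List String) : List Int :=
  (pvLater data p.1 p.2).foldl PySem.Set.add dc

def pvRhsStep (data : List (List String)) (dc : List Int) (c : List String) : List Int :=
  ((pvIdxs data c).drop 1).foldl PySem.Set.add dc

-- the columns of the second list not yet seen (threaded seen-list), in order
def pvNewCols (s : List (List String)) : List (List String) → List (List String)
  | [] => []
  | c :: t => if c ∈ s then pvNewCols s t else c :: pvNewCols (s ++ [c]) t

lemma pv_newCols_congr : ∀ (l s s' : List (List String)),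
    (∀ c, c ∈ s ↔ c ∈ s') → pvNewCols s l = pvNewCols s' l := by
  intro l
  induction l with
  | nil => intro s s' _; rfl
  | cons c t ih =>
      intro s s' h
      by_cases hc : c ∈ s
      · simp [pvNewCols, hc, (h c).mp hc, ih s s' h]
      · have hc' : c ∉ s' := fun hmem => hc ((h c).mpr hmem)
        have h' : ∀ d, d ∈ s ++ [c] ↔ d ∈ s' ++ [c] := by
          intro d; simp [h d]
        simp [pvNewCols, hc, hc', ih (s ++ [c]) (s' ++ [c]) h']

lemma pv_foldl_ite_add {β : Type} (P : Int × β → Bool) :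
    ∀ (l : List (Int × β)) (dc : List Int),
      l.foldl (fun s q => if P q then PySem.Set.add s q.1 else s) dc
        = ((l.filter P).map (·.1)).foldl PySem.Set.add dc := by
  intro l
  induction l with
  | nil => intro dc; rfl
  | cons x t ih =>
      intro dc
      by_cases h : P x = true
      · simp [List.foldl_cons, h, ih]
      · simp [List.foldl_cons, h, ih]

lemma pv_inner_eq (data : List (List String)) (p : Int × List String) (dc : List Int) :
    (PySem.List.enumerate data).foldl (fun dc2 q =>
        if q.1 ≤ p.1 then dc2
        else if p.2 = q.2 then PySem.Set.add dc2 q.1 else dc2) dc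
      = pvStep data dc p := by
  have hfun : ∀ (s : List Int), ∀ q ∈ PySem.List.enumerate data,
      (if q.1 ≤ p.1 then s else if p.2 = q.2 then PySem.Set.add s q.1 else s)
        = (if (decide (p.1 < q.1) && (q.2 == p.2)) then PySem.Set.add s q.1 else s) := by
    intro s q _
    by_cases h1 : q.1 ≤ p.1
    · simp [h1, not_lt.mpr h1]
    · have hlt : p.1 < q.1 := lt_of_not_ge h1
      by_cases h2 : p.2 = q.2
      · simp [h1, hlt, h2]
      · have hne : (q.2 == p.2) = false := by
          rw [beq_eq_false_iff_ne]; exact fun e => h2 e.symm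
        simp [h1, hlt, h2, hne]
  rw [PySem.List.foldl_congr_mem (PySem.List.enumerate data) _
      (fun s q => if (decide (p.1 < q.1) && (q.2 == p.2)) then PySem.Set.add s q.1 else s)
      dc hfun]
  rw [pv_foldl_ite_add]; rfl

lemma pv_foldl_add_noop (xs : List Int) (s : List Int) (h : ∀ x ∈ xs, x ∈ s) :
    xs.foldl PySem.Set.add s = s := by
  induction xs with
  | nil => rfl
  | cons x t ih =>
      simp only [List.foldl_cons]
      rw [PySem.Set.add_of_mem (h x (by simp))]
      exact ih (fun y hy => h y (by simp [hy]))

lemma pv_mem_foldl_add_left (xs : List Int) :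
    ∀ (s : List Int) (x : Int), x ∈ s → x ∈ xs.foldl PySem.Set.add s := by
  induction xs with
  | nil => intro s x hx; simpa using hx
  | cons y t ih =>
      intro s x hx
      exact ih _ _ (by simp [PySem.Set.mem_add, hx])

lemma pv_mem_foldl_add_right (xs : List Int) :
    ∀ (s : List Int) (x : Int), x ∈ xs → x ∈ xs.foldl PySem.Set.add s := by
  induction xs with
  | nil => intro s x hx; simp at hx
  | cons y t ih =>
      intro s x hx
      rcases List.mem_cons.mp hx with h | h
      · subst h
        exact pv_mem_foldl_add_left t _ x (by simp [PySem.Set.mem_add])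
      · exact ih _ _ h

lemma pv_mem_later (data : List (List String)) (i : Int) (c : List String) (j : Int) :
    j ∈ pvLater data i c ↔
      ∃ q ∈ PySem.List.enumerate data, q.1 = j ∧ i < j ∧ q.2 = c := by
  simp only [pvLater, List.mem_map, List.mem_filter, Bool.and_eq_true, decide_eq_true_eq,
    beq_iff_eq]
  constructor
  · rintro ⟨q, ⟨hq, hlt, hc⟩, rfl⟩; exact ⟨q, hq, rfl, hlt, hc⟩
  · rintro ⟨q, hq, rfl, hlt, hc⟩; exact ⟨q, ⟨hq, hlt, hc⟩, rfl⟩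

-- at the global first occurrence x of its column, the strictly-later duplicates are
-- exactly the tail of the full index list of that column
lemma pv_first_occ (data : List (List String)) (pre t : List (Int × List String))
    (x : Int × List String)
    (hE : PySem.List.enumerate data = pre ++ x :: t)
    (hx : ∀ p ∈ pre, p.2 ≠ x.2) :
    pvIdxs data x.2 = x.1 :: pvLater data x.1 x.2 := by
  have hpw : (pre ++ x :: t).Pairwise (fun p q : Int × List String => p.1 < q.1) := by
    rw [← hE]; exact PySem.List.pairwise_lt_enumerate data 0
  have ht : ∀ q ∈ t, x.1 < q.1 :=
    (List.pairwise_cons.mp (List.pairwise_append.mp hpw).2.1).1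
  have hpre1 : pre.filter (fun p => p.2 == x.2) = [] := by
    rw [List.filter_eq_nil_iff]; intro p hp; simpa using hx p hp
  have hpre2 : pre.filter (fun q => decide (x.1 < q.1) && (q.2 == x.2)) = [] := by
    rw [List.filter_eq_nil_iff]; intro p hp
    simp only [Bool.and_eq_true, not_and, beq_iff_eq]
    intro _; exact hx p hp
  have htf : t.filter (fun q => decide (x.1 < q.1) && (q.2 == x.2))
      = t.filter (fun q => q.2 == x.2) := by
    apply List.filter_congr
    intro q hq; simp [ht q hq]
  simp [pvIdxs, pvLater, hE, List.filter_append, hpre1, hpre2, htf]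

-- the main invariant induction over the outer loop of A
lemma pv_main (data : List (List String)) :
    ∀ (l pre : List (Int × List String)) (dc : List Int),
      PySem.List.enumerate data = pre ++ l →
      (∀ q ∈ l, q.2 ∈ pre.map (·.2) → ∀ j ∈ pvLater data q.1 q.2, j ∈ dc) →
      l.foldl (pvStep data) dc
        = (pvNewCols (pre.map (·.2)) (l.map (·.2))).foldl (pvRhsStep data) dc := by
  intro l
  induction l with
  | nil => intro pre dc _ _; rfl
  | cons x t ih =>
      intro pre dc hE hinv
      have hE' : PySem.List.enumerate data = (pre ++ [x]) ++ t := by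
        simpa using hE
      by_cases hx : x.2 ∈ pre.map (·.2)
      · -- x's column was seen before: this outer iteration adds nothing
        have hnoop : pvStep data dc x = dc :=
          pv_foldl_add_noop _ _ (hinv x (by simp) hx)
        have hinv' : ∀ q ∈ t, q.2 ∈ (pre ++ [x]).map (·.2) →
            ∀ j ∈ pvLater data q.1 q.2, j ∈ dc := by
          intro q hq hqc
          rcases (by simpa using hqc : q.2 ∈ pre.map (·.2) ∨ q.2 = x.2) with h | h
          · exact hinv q (by simp [hq]) h
          · exact hinv q (by simp [hq]) (h ▸ hx)
        have hcongr : pvNewCols ((pre ++ [x]).map (·.2)) (t.map (·.2))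
            = pvNewCols (pre.map (·.2)) (t.map (·.2)) := by
          apply pv_newCols_congr
          intro c; constructor
          · intro hc
            rcases (by simpa using hc : c ∈ pre.map (·.2) ∨ c = x.2) with h | h
            · exact h
            · exact h ▸ hx
          · intro hc; simp [hc]
        have := ih (pre ++ [x]) dc hE' hinv'
        rw [hcongr] at this
        simpa [List.foldl_cons, hnoop, pvNewCols, hx] using this
      · -- first occurrence of x's column
        have hxp : ∀ p ∈ pre, p.2 ≠ x.2 := by
          intro p hp hc
          exact hx (List.mem_map.mpr ⟨p, hp, hc⟩)
        have hidx := pv_first_occ data pre t x hE hxp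
        have hpw : (pre ++ x :: t).Pairwise (fun p q : Int × List String => p.1 < q.1) := by
          rw [← hE]; exact PySem.List.pairwise_lt_enumerate data 0
        have ht : ∀ q ∈ t, x.1 < q.1 :=
          (List.pairwise_cons.mp (List.pairwise_append.mp hpw).2.1).1
        have hstep : pvRhsStep data dc x.2 = pvStep data dc x := by
          simp [pvRhsStep, hidx, pvStep]
        have hinv' : ∀ q ∈ t, q.2 ∈ (pre ++ [x]).map (·.2) →
            ∀ j ∈ pvLater data q.1 q.2, j ∈ pvStep data dc x := by
          intro q hq hqc j hj
          rcases (by simpa using hqc : q.2 ∈ pre.map (·.2) ∨ q.2 = x.2) with h | h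
          · exact pv_mem_foldl_add_left _ _ _ (hinv q (by simp [hq]) h j hj)
          · -- j is a later duplicate of x's column: it was added at x
            have hj' : j ∈ pvLater data x.1 x.2 := by
              rw [pv_mem_later] at hj ⊢
              obtain ⟨r, hr, hrj, hlt, hrc⟩ := hj
              exact ⟨r, hr, hrj, lt_trans (ht q hq) hlt, h ▸ hrc⟩
            exact pv_mem_foldl_add_right _ _ _ hj'
        have hrec := ih (pre ++ [x]) (pvStep data dc x) hE' hinv'
        calc (x :: t).foldl (pvStep data) dc
            = t.foldl (pvStep data) (pvStep data dc x) := by rw [List.foldl_cons]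
          _ = (pvNewCols ((pre ++ [x]).map (·.2)) (t.map (·.2))).foldl
                (pvRhsStep data) (pvStep data dc x) := hrec
          _ = (pvNewCols (pre.map (·.2)) ((x :: t).map (·.2))).foldl (pvRhsStep data) dc := by
                rw [← hstep]
                simp [pvNewCols, hx, List.foldl_cons]

lemma pv_newCols_update :
    ∀ (l s : List (List String)), s ++ pvNewCols s l = PySem.Set.update s l := by
  intro l
  induction l with
  | nil => intro s; simp [pvNewCols, PySem.Set.update]
  | cons c t ih =>
      intro s
      by_cases h : c ∈ s
      · rw [PySem.Set.update_cons, PySem.Set.add_of_mem h]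
        simpa [pvNewCols, h] using ih s
      · rw [PySem.Set.update_cons, PySem.Set.add_of_not_mem h]
        have := ih (s ++ [c])
        simpa [pvNewCols, h] using this

lemma pv_A_eq (data : List (List String)) (drop_cols : List Int) :
    get_dupe_cols_py data drop_cols
      = (PySem.Set.ofList data).foldl (pvRhsStep data) drop_cols := by
  have h1 : get_dupe_cols_py data drop_cols
      = (PySem.List.enumerate data).foldl (pvStep data) drop_cols := by
    unfold get_dupe_cols_py
    exact PySem.List.foldl_congr_mem (PySem.List.enumerate data) _ (pvStep data) drop_cols
      (fun acc p _ => pv_inner_eq data p acc)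
  have h2 := pv_main data (PySem.List.enumerate data) [] drop_cols (by simp)
    (by intro q _ hq; simp at hq)
  have h3 : (PySem.List.enumerate data).map (·.2) = data :=
    PySem.List.map_snd_enumerate data 0
  have h4 : pvNewCols [] data = PySem.Set.ofList data := by
    have := pv_newCols_update data []
    simpa [PySem.Set.ofList_eq_foldl, PySem.Set.update] using this
  rw [h1, h2, h3]
  simp only [List.map_nil]
  rw [h4]

lemma pv_groups_getD (data : List (List String)) (c : List String) :
    (pvGroups data).getD c [] = pvIdxs data c := by
  have hswap : pvGroups data
      = ((PySem.List.enumerate data).map (fun p => (p.2, p.1))).foldl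
          (fun d q => d.modify q.1 [] (fun v => v ++ [q.2])) PySem.Dict.empty := by
    unfold pvGroups; rw [List.foldl_map]
  rw [hswap, PySem.Dict.getD_foldl_modify_append]
  simp [pvIdxs, List.filter_map, Function.comp_def, PySem.Dict.getD_empty]

lemma pv_B_eq (data : List (List String)) (drop_cols : List Int) :
    get_dupe_cols_py_alt data drop_cols
      = (PySem.Set.ofList data).foldl (pvRhsStep data) drop_cols := by
  unfold get_dupe_cols_py_alt
  have hkeys : (pvGroups data).keys = PySem.Set.ofList data := by
    unfold pvGroups
    rw [PySem.Dict.keys_foldl_modify_key]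
    simp [PySem.Dict.keys_empty, PySem.Set.update, PySem.Set.ofList_eq_foldl,
      PySem.List.map_snd_enumerate]
  have hnd : (pvGroups data).keys.Nodup := by
    rw [hkeys]; exact PySem.Set.nodup_ofList data
  have hvals : (pvGroups data).values
      = (pvGroups data).keys.map (fun k => (pvGroups data).getD k []) :=
    PySem.Dict.values_eq_map_keys (pvGroups data) hnd []
  rw [hvals, List.foldl_map, hkeys]
  refine PySem.List.foldl_congr_mem _ _ _ _ ?_
  intro acc c _
  rw [pv_groups_getD data c]
  simp [pvRhsStep, PySem.List.slice_from_one, List.drop_one]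

-- ===== VERDICT (by name: the statement is the Claim_ definition above) =====
theorem get_dupe_cols_py_spec : Claim_equal_get_dupe_cols_py := by
  intro data drop_cols _
  show get_dupe_cols_py data drop_cols = get_dupe_cols_py_alt data drop_cols
  rw [pv_A_eq, pv_B_eq]
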